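-- pv_equiv track=rewrite | github.com/gridvisi/Python_workspace | 2 Project_base_learning/处理网址/6 kyu _com_gov_org_first.py | order_by_domain
-- ===== SOURCE A (Python) =====
-- def ex(id):
--     ext = id.split(".")[-1]
--     return ext
--
-- def order_by_domain(addresses):
--     com = []
--     gov = []
--     org = []
--     res = []
--     for i in addresses:
--         i += ' '
--         if ".com " in i or ".com/" in i:
--             com.append(i[:-1])
--         elif ".gov " in i or ".gov/" in i:
--             gov.append(i[:-1])
--         elif ".org " in i or ".org/" in i:
--             org.append(i[:-1])
--         else:
--             res.append(i[:-1])
--     return sorted(com) + sorted(gov) + sorted(org) + sorted(res, key=ex)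
-- ===== SOURCE B (Python) =====
-- def order_by_domain(addresses):
--     def ext(a):
--         return a.split(".")[-1]
--
--     def key(a):
--         t = a + ' '
--         if ".com " in t or ".com/" in t:
--             return (0, a)
--         if ".gov " in t or ".gov/" in t:
--             return (1, a)
--         if ".org " in t or ".org/" in t:
--             return (2, a)
--         return (3, ext(a))
--
--     return sorted(addresses, key=key)
-- ===== Notes on version B (the rewrite author's own statement) =====
-- stated objective: alternative
-- what changed: Replaces the four-bucket loop plus four separate sorts with a single stable sort of the whole list under a composite (priority, secondary) key, relying on sort stability for the 'other' group's tie order.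
import Mathlib
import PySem

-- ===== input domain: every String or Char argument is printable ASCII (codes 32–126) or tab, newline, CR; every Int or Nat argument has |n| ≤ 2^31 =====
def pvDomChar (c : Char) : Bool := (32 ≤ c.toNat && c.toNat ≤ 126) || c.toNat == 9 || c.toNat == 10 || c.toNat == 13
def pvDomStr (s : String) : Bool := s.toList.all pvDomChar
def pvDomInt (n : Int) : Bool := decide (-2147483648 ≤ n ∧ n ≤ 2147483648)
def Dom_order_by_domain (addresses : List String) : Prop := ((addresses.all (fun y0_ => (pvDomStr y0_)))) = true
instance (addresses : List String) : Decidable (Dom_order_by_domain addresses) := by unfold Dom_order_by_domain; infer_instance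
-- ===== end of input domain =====

-- Equivalent re-implementation: B replaces A's four-bucket loop + four sorts by ONE stable
-- sort under a composite (priority, secondary) key; same return value on every input.


-- ===== PORT A =====
-- ex(id) = id.split(".")[-1]; the key is compared as a Python string, i.e. as its char list.
def exA (id : String) : List Char :=
  PySem.List.pyGetD (PySem.Chars.splitOn id.toList ['.']) (-1) []

-- the loop state is the 4-tuple (com, gov, org, res); i += ' ' ; i[:-1] is the slice below
def order_by_domain (addresses : List String) : List String :=
  let st := addresses.foldl
    (fun (s : List String × List String × List String × List String) i =>
      let t := i.toList ++ [' ']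
      let back := String.ofList (PySem.List.slice t none (some (-1)))
      if PySem.Chars.isIn ['.','c','o','m',' '] t || PySem.Chars.isIn ['.','c','o','m','/'] t then
        (s.1 ++ [back], s.2.1, s.2.2.1, s.2.2.2)
      else if PySem.Chars.isIn ['.','g','o','v',' '] t || PySem.Chars.isIn ['.','g','o','v','/'] t then
        (s.1, s.2.1 ++ [back], s.2.2.1, s.2.2.2)
      else if PySem.Chars.isIn ['.','o','r','g',' '] t || PySem.Chars.isIn ['.','o','r','g','/'] t then
        (s.1, s.2.1, s.2.2.1 ++ [back], s.2.2.2)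
      else
        (s.1, s.2.1, s.2.2.1, s.2.2.2 ++ [back]))
    ([], [], [], [])
  PySem.List.sorted st.1 (fun x => x.toList) ++ PySem.List.sorted st.2.1 (fun x => x.toList)
    ++ PySem.List.sorted st.2.2.1 (fun x => x.toList) ++ PySem.List.sorted st.2.2.2 exA

-- ===== PORT B =====
-- ext(a) = a.split(".")[-1] (B's own helper, compared as a char list, like any Python string)
def extB (a : String) : List Char :=
  PySem.List.pyGetD (PySem.Chars.splitOn a.toList ['.']) (-1) []

-- key(a) = (priority, secondary): the composite sort key of Source B
def keyB (a : String) : Int × List Char :=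
  let t := a.toList ++ [' ']
  if PySem.Chars.isIn ['.','c','o','m',' '] t || PySem.Chars.isIn ['.','c','o','m','/'] t then
    (0, a.toList)
  else if PySem.Chars.isIn ['.','g','o','v',' '] t || PySem.Chars.isIn ['.','g','o','v','/'] t then
    (1, a.toList)
  else if PySem.Chars.isIn ['.','o','r','g',' '] t || PySem.Chars.isIn ['.','o','r','g','/'] t then
    (2, a.toList)
  else
    (3, extB a)

def order_by_domain_alt (addresses : List String) : List String :=
  PySem.List.sorted2 addresses (fun a => (keyB a).1) (fun a => (keyB a).2)

-- ===== PRECONDITION & SPEC =====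
def Spec_order_by_domain (addresses : List String) (out : List String) : Prop := out = order_by_domain_alt addresses
instance (addresses : List String) (out : List String) : Decidable (Spec_order_by_domain addresses out) := by unfold Spec_order_by_domain; infer_instance

-- ===== CLAIM (what is proved, stated in full; the proofs are below) =====
def Claim_equal_order_by_domain : Prop := ∀ (addresses : List String), Dom_order_by_domain addresses → Spec_order_by_domain addresses (order_by_domain addresses)

-- ===== LEMMAS AND PROOFS =====

-- proof-only names for the classification tests of the shared if/elif chain
def cCom (x : String) : Bool :=
  PySem.Chars.isIn ['.','c','o','m',' '] (x.toList ++ [' ']) || PySem.Chars.isIn ['.','c','o','m','/'] (x.toList ++ [' '])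
def cGov (x : String) : Bool :=
  PySem.Chars.isIn ['.','g','o','v',' '] (x.toList ++ [' ']) || PySem.Chars.isIn ['.','g','o','v','/'] (x.toList ++ [' '])
def cOrg (x : String) : Bool :=
  PySem.Chars.isIn ['.','o','r','g',' '] (x.toList ++ [' ']) || PySem.Chars.isIn ['.','o','r','g','/'] (x.toList ++ [' '])

-- the elif chain as four disjoint filters
def dCom (x : String) : Bool := cCom x
def dGov (x : String) : Bool := !cCom x && cGov x
def dOrg (x : String) : Bool := !cCom x && !cGov x && cOrg x
def dRes (x : String) : Bool := !cCom x && !cGov x && !cOrg x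

-- proof-only name for the body of A's loop (definitionally the lambda in the port)
def stepA (s : List String × List String × List String × List String) (i : String) :
    List String × List String × List String × List String :=
  let t := i.toList ++ [' ']
  let back := String.ofList (PySem.List.slice t none (some (-1)))
  if PySem.Chars.isIn ['.','c','o','m',' '] t || PySem.Chars.isIn ['.','c','o','m','/'] t then
    (s.1 ++ [back], s.2.1, s.2.2.1, s.2.2.2)
  else if PySem.Chars.isIn ['.','g','o','v',' '] t || PySem.Chars.isIn ['.','g','o','v','/'] t then
    (s.1, s.2.1 ++ [back], s.2.2.1, s.2.2.2)
  else if PySem.Chars.isIn ['.','o','r','g',' '] t || PySem.Chars.isIn ['.','o','r','g','/'] t then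
    (s.1, s.2.1, s.2.2.1 ++ [back], s.2.2.2)
  else
    (s.1, s.2.1, s.2.2.1, s.2.2.2 ++ [back])

theorem back_eq (x : String) :
    String.ofList (PySem.List.slice (x.toList ++ [' ']) none (some (-1))) = x := by
  simp [PySem.List.slice]

theorem stepA_com {x : String} (h : cCom x = true) (s : List String × List String × List String × List String) :
    stepA s x = (s.1 ++ [x], s.2.1, s.2.2.1, s.2.2.2) := by
  simp only [cCom] at h; simp [stepA, h, back_eq]

theorem stepA_gov {x : String} (h0 : cCom x = false) (h : cGov x = true)
    (s : List String × List String × List String × List String) :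
    stepA s x = (s.1, s.2.1 ++ [x], s.2.2.1, s.2.2.2) := by
  simp only [cCom, Bool.or_eq_false_iff] at h0; simp only [cGov] at h
  simp [stepA, h0.1, h0.2, h, back_eq]

theorem stepA_org {x : String} (h0 : cCom x = false) (h1 : cGov x = false) (h : cOrg x = true)
    (s : List String × List String × List String × List String) :
    stepA s x = (s.1, s.2.1, s.2.2.1 ++ [x], s.2.2.2) := by
  simp only [cCom, Bool.or_eq_false_iff] at h0; simp only [cGov, Bool.or_eq_false_iff] at h1
  simp only [cOrg] at h
  simp [stepA, h0.1, h0.2, h1.1, h1.2, h, back_eq]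

theorem stepA_res {x : String} (h0 : cCom x = false) (h1 : cGov x = false) (h2 : cOrg x = false)
    (s : List String × List String × List String × List String) :
    stepA s x = (s.1, s.2.1, s.2.2.1, s.2.2.2 ++ [x]) := by
  simp only [cCom, Bool.or_eq_false_iff] at h0; simp only [cGov, Bool.or_eq_false_iff] at h1
  simp only [cOrg, Bool.or_eq_false_iff] at h2
  simp [stepA, h0.1, h0.2, h1.1, h1.2, h2.1, h2.2, back_eq]

theorem keyB_com {x : String} (h : cCom x = true) : keyB x = (0, x.toList) := by
  simp only [keyB]; rw [if_pos]; exact h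

theorem keyB_gov {x : String} (h0 : cCom x = false) (h : cGov x = true) :
    keyB x = (1, x.toList) := by
  simp only [keyB]; rw [if_neg, if_pos]
  · exact h
  · simp only [cCom] at h0; simp [h0]

theorem keyB_org {x : String} (h0 : cCom x = false) (h1 : cGov x = false) (h : cOrg x = true) :
    keyB x = (2, x.toList) := by
  simp only [keyB]; rw [if_neg, if_neg, if_pos]
  · exact h
  · simp only [cGov] at h1; simp [h1]
  · simp only [cCom] at h0; simp [h0]

theorem keyB_res {x : String} (h0 : cCom x = false) (h1 : cGov x = false) (h2 : cOrg x = false) :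
    keyB x = (3, extB x) := by
  simp only [keyB]; rw [if_neg, if_neg, if_neg]
  · simp only [cOrg] at h2; simp [h2]
  · simp only [cGov] at h1; simp [h1]
  · simp only [cCom] at h0; simp [h0]

-- A's loop, characterised: the four accumulators collect the four disjoint filters
theorem loop_eq (l : List String) (a b c d : List String) :
    l.foldl stepA (a, b, c, d)
      = (a ++ l.filter dCom, b ++ l.filter dGov, c ++ l.filter dOrg, d ++ l.filter dRes) := by
  induction l generalizing a b c d with
  | nil => simp
  | cons x xs ih =>
    rw [List.foldl_cons]
    by_cases h0 : cCom x
    · rw [stepA_com h0, ih]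
      simp [dCom, dGov, dOrg, dRes, h0]
    · rw [Bool.not_eq_true] at h0
      by_cases h1 : cGov x
      · rw [stepA_gov h0 h1, ih]
        simp [dCom, dGov, dOrg, dRes, h0, h1]
      · rw [Bool.not_eq_true] at h1
        by_cases h2 : cOrg x
        · rw [stepA_org h0 h1 h2, ih]
          simp [dCom, dGov, dOrg, dRes, h0, h1, h2]
        · rw [Bool.not_eq_true] at h2
          rw [stepA_res h0 h1 h2, ih]
          simp [dCom, dGov, dOrg, dRes, h0, h1, h2]

-- A's port, characterised: four sorted disjoint filters, concatenated
theorem A_eq (l : List String) :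
    order_by_domain l
      = PySem.List.sorted (l.filter dCom) (fun x => x.toList)
        ++ (PySem.List.sorted (l.filter dGov) (fun x => x.toList)
        ++ (PySem.List.sorted (l.filter dOrg) (fun x => x.toList)
        ++ PySem.List.sorted (l.filter dRes) exA)) := by
  have h : order_by_domain l
      = (let st := l.foldl stepA ([], [], [], [])
         PySem.List.sorted st.1 (fun x => x.toList) ++ PySem.List.sorted st.2.1 (fun x => x.toList)
           ++ PySem.List.sorted st.2.2.1 (fun x => x.toList) ++ PySem.List.sorted st.2.2.2 exA) := rfl
  rw [h]
  simp only [loop_eq, List.nil_append, List.append_assoc]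

-- inserting past a prefix it never goes before
theorem ins_skip {A : Type} (b : A → A → Bool) (x : A) (ys zs : List A)
    (h : ∀ y ∈ ys, b x y = false) :
    PySem.List.insertBy b x (ys ++ zs) = ys ++ PySem.List.insertBy b x zs := by
  induction ys with
  | nil => simp
  | cons y t ih =>
    simp only [List.cons_append, PySem.List.insertBy, h y (List.mem_cons_self)]
    simp only [Bool.false_eq_true, if_false]
    rw [ih (fun z hz => h z (List.mem_cons_of_mem y hz))]

-- inserting before a suffix it always goes before
theorem ins_stop {A : Type} (b : A → A → Bool) (x : A) (ys zs : List A)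
    (h : ∀ z ∈ zs, b x z = true) :
    PySem.List.insertBy b x (ys ++ zs) = PySem.List.insertBy b x ys ++ zs := by
  induction ys with
  | nil =>
    cases zs with
    | nil => rfl
    | cons z t => simp [PySem.List.insertBy, h z (List.mem_cons_self)]
  | cons y t ih =>
    simp only [List.cons_append, PySem.List.insertBy]
    by_cases hb : b x y
    · simp [hb]
    · simp only [Bool.not_eq_true] at hb
      simp [hb, ih]

-- insertBy only looks at 'b x ·' on the list's elements
theorem ins_congr {A : Type} (b b' : A → A → Bool) (x : A) (ys : List A)
    (h : ∀ y ∈ ys, b x y = b' x y) :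
    PySem.List.insertBy b x ys = PySem.List.insertBy b' x ys := by
  induction ys with
  | nil => rfl
  | cons y t ih =>
    simp only [PySem.List.insertBy, h y (List.mem_cons_self)]
    rw [ih (fun z hz => h z (List.mem_cons_of_mem y hz))]

theorem sorted_concat {A K : Type} [LT K] [DecidableLT K] (l : List A) (x : A) (key : A → K) :
    PySem.List.sorted (l ++ [x]) key
      = PySem.List.insertBy (fun a b => decide (key a < key b)) x (PySem.List.sorted l key) := by
  rw [PySem.List.sorted_eq_foldl_insertBy, PySem.List.sorted_eq_foldl_insertBy, List.foldl_append]
  rfl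

theorem sorted2_concat {A K1 K2 : Type} [LT K1] [DecidableLT K1] [LT K2] [DecidableLT K2]
    (l : List A) (x : A) (k1 : A → K1) (k2 : A → K2) :
    PySem.List.sorted2 (l ++ [x]) k1 k2
      = PySem.List.insertBy
          (fun a b => decide (k1 a < k1 b) || (!decide (k1 b < k1 a) && decide (k2 a < k2 b)))
          x (PySem.List.sorted2 l k1 k2) := by
  simp [PySem.List.sorted2, List.foldl_append]

-- the key of every member of a sorted filtered block
theorem prio_of_mem_com {y : String} {l : List String}
    (h : y ∈ PySem.List.sorted (l.filter dCom) (fun x => x.toList)) : keyB y = (0, y.toList) := by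
  rw [PySem.List.mem_sorted] at h
  exact keyB_com (List.of_mem_filter h)

theorem prio_of_mem_gov {y : String} {l : List String}
    (h : y ∈ PySem.List.sorted (l.filter dGov) (fun x => x.toList)) : keyB y = (1, y.toList) := by
  rw [PySem.List.mem_sorted] at h
  have hy := List.of_mem_filter h
  simp only [dGov, Bool.and_eq_true, Bool.not_eq_true'] at hy
  exact keyB_gov hy.1 hy.2

theorem prio_of_mem_org {y : String} {l : List String}
    (h : y ∈ PySem.List.sorted (l.filter dOrg) (fun x => x.toList)) : keyB y = (2, y.toList) := by
  rw [PySem.List.mem_sorted] at h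
  have hy := List.of_mem_filter h
  simp only [dOrg, Bool.and_eq_true, Bool.not_eq_true', and_assoc] at hy
  exact keyB_org hy.1 hy.2.1 hy.2.2

theorem prio_of_mem_res {y : String} {l : List String}
    (h : y ∈ PySem.List.sorted (l.filter dRes) exA) : keyB y = (3, extB y) := by
  rw [PySem.List.mem_sorted] at h
  have hy := List.of_mem_filter h
  simp only [dRes, Bool.and_eq_true, Bool.not_eq_true', and_assoc] at hy
  exact keyB_res hy.1 hy.2.1 hy.2.2

-- the single composite-key stable sort equals the four concatenated block sorts
theorem main_eq (l : List String) :
    order_by_domain_alt l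
      = PySem.List.sorted (l.filter dCom) (fun x => x.toList)
        ++ (PySem.List.sorted (l.filter dGov) (fun x => x.toList)
        ++ (PySem.List.sorted (l.filter dOrg) (fun x => x.toList)
        ++ PySem.List.sorted (l.filter dRes) exA)) := by
  induction l using List.reverseRecOn with
  | nil => simp [order_by_domain_alt, PySem.List.sorted2, PySem.List.sorted]
  | append_singleton l x ih =>
    unfold order_by_domain_alt at ih ⊢
    rw [sorted2_concat, ih]
    by_cases h0 : cCom x
    · have hk := keyB_com h0
      have hfC : List.filter dCom (l ++ [x]) = List.filter dCom l ++ [x] := by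
        simp [List.filter_append, dCom, h0]
      have hfG : List.filter dGov (l ++ [x]) = List.filter dGov l := by
        simp [List.filter_append, dGov, h0]
      have hfO : List.filter dOrg (l ++ [x]) = List.filter dOrg l := by
        simp [List.filter_append, dOrg, h0]
      have hfR : List.filter dRes (l ++ [x]) = List.filter dRes l := by
        simp [List.filter_append, dRes, h0]
      rw [hfC, hfG, hfO, hfR, sorted_concat,
        ins_stop _ _ _ _ (by
          intro z hz
          simp only [List.mem_append] at hz
          rcases hz with hz | hz | hz
          · simp [hk, prio_of_mem_gov hz]
          · simp [hk, prio_of_mem_org hz]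
          · simp [hk, prio_of_mem_res hz]),
        ins_congr _ (fun a b => decide (a.toList < b.toList)) x _ (by
          intro y hy
          simp [hk, prio_of_mem_com hy])]
    · rw [Bool.not_eq_true] at h0
      by_cases h1 : cGov x
      · have hk := keyB_gov h0 h1
        have hfC : List.filter dCom (l ++ [x]) = List.filter dCom l := by
          simp [List.filter_append, dCom, h0]
        have hfG : List.filter dGov (l ++ [x]) = List.filter dGov l ++ [x] := by
          simp [List.filter_append, dGov, h0, h1]
        have hfO : List.filter dOrg (l ++ [x]) = List.filter dOrg l := by
          simp [List.filter_append, dOrg, h1]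
        have hfR : List.filter dRes (l ++ [x]) = List.filter dRes l := by
          simp [List.filter_append, dRes, h1]
        rw [hfC, hfG, hfO, hfR, sorted_concat,
          ins_skip _ _ _ _ (by
            intro y hy
            simp [hk, prio_of_mem_com hy]),
          ins_stop _ _ _ _ (by
            intro z hz
            simp only [List.mem_append] at hz
            rcases hz with hz | hz
            · simp [hk, prio_of_mem_org hz]
            · simp [hk, prio_of_mem_res hz]),
          ins_congr _ (fun a b => decide (a.toList < b.toList)) x _ (by
            intro y hy
            simp [hk, prio_of_mem_gov hy])]
      · rw [Bool.not_eq_true] at h1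
        by_cases h2 : cOrg x
        · have hk := keyB_org h0 h1 h2
          have hfC : List.filter dCom (l ++ [x]) = List.filter dCom l := by
            simp [List.filter_append, dCom, h0]
          have hfG : List.filter dGov (l ++ [x]) = List.filter dGov l := by
            simp [List.filter_append, dGov, h1]
          have hfO : List.filter dOrg (l ++ [x]) = List.filter dOrg l ++ [x] := by
            simp [List.filter_append, dOrg, h0, h1, h2]
          have hfR : List.filter dRes (l ++ [x]) = List.filter dRes l := by
            simp [List.filter_append, dRes, h2]
          rw [hfC, hfG, hfO, hfR, sorted_concat,
            ins_skip _ _ _ _ (by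
              intro y hy
              simp [hk, prio_of_mem_com hy]),
            ins_skip _ _ _ _ (by
              intro y hy
              simp [hk, prio_of_mem_gov hy]),
            ins_stop _ _ _ _ (by
              intro z hz
              simp [hk, prio_of_mem_res hz]),
            ins_congr _ (fun a b => decide (a.toList < b.toList)) x _ (by
              intro y hy
              simp [hk, prio_of_mem_org hy])]
        · rw [Bool.not_eq_true] at h2
          have hk := keyB_res h0 h1 h2
          have hfC : List.filter dCom (l ++ [x]) = List.filter dCom l := by
            simp [List.filter_append, dCom, h0]
          have hfG : List.filter dGov (l ++ [x]) = List.filter dGov l := by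
            simp [List.filter_append, dGov, h1]
          have hfO : List.filter dOrg (l ++ [x]) = List.filter dOrg l := by
            simp [List.filter_append, dOrg, h2]
          have hfR : List.filter dRes (l ++ [x]) = List.filter dRes l ++ [x] := by
            simp [List.filter_append, dRes, h0, h1, h2]
          rw [hfC, hfG, hfO, hfR, sorted_concat,
            ins_skip _ _ _ _ (by
              intro y hy
              simp [hk, prio_of_mem_com hy]),
            ins_skip _ _ _ _ (by
              intro y hy
              simp [hk, prio_of_mem_gov hy]),
            ins_skip _ _ _ _ (by
              intro y hy
              simp [hk, prio_of_mem_org hy]),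
            ins_congr _ (fun a b => decide (exA a < exA b)) x _ (by
              intro y hy
              have : extB y = exA y := rfl
              simp [hk, prio_of_mem_res hy, this]
              rfl)]

-- ===== VERDICT (by name: the statement is the Claim_ definition above) =====
theorem order_by_domain_spec : Claim_equal_order_by_domain := by
  intro addresses _
  unfold Spec_order_by_domain
  rw [A_eq, main_eq]
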